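-- pv_equiv track=rewrite | github.com/yxliaoyx/picoCTF-practice | 10 vault-door-8/main.py | reverse_scramble
-- ===== SOURCE A (Python) =====
-- def switch_bits(c, p1, p2):
--     mask1 = 1 << p1
--     mask2 = 1 << p2
--     bit1 = c & mask1
--     bit2 = c & mask2
--     rest = c & ~(mask1 | mask2)
--     shift = p2 - p1
--     return (bit1 << shift) | (bit2 >> shift) | rest
--
-- def reverse_scramble(scrambled_chars):
--     unscrambled = []
--     for c in scrambled_chars:
--         c = switch_bits(c, 6, 7)
--         c = switch_bits(c, 2, 5)
--         c = switch_bits(c, 3, 4)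
--         c = switch_bits(c, 0, 1)
--         c = switch_bits(c, 4, 7)
--         c = switch_bits(c, 5, 6)
--         c = switch_bits(c, 0, 3)
--         c = switch_bits(c, 1, 2)
--         unscrambled.append(chr(c))
--     return "".join(unscrambled)
-- ===== SOURCE B (Python) =====
-- _BIT_DEST = (2, 3, 6, 7, 0, 1, 4, 5)  # composed effect of A's eight bit-swaps: source bit i -> bit _BIT_DEST[i]
--
-- def _unscramble_byte(b):
--     v = 0
--     for src, dst in enumerate(_BIT_DEST):
--         v |= ((b >> src) & 1) << dst
--     return v
--
-- def reverse_scramble(scrambled_chars):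
--     return "".join(chr((c & ~0xFF) | _unscramble_byte(c & 0xFF)) for c in scrambled_chars)
-- ===== Notes on version B (the rewrite author's own statement) =====
-- stated objective: simpler
-- what changed: Replaces the per-character chain of eight switch_bits calls by the single composed bit permutation (source bit i goes to _BIT_DEST[i]), applied to the low byte in one gather pass with the high bits OR-ed back.
import Mathlib
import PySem

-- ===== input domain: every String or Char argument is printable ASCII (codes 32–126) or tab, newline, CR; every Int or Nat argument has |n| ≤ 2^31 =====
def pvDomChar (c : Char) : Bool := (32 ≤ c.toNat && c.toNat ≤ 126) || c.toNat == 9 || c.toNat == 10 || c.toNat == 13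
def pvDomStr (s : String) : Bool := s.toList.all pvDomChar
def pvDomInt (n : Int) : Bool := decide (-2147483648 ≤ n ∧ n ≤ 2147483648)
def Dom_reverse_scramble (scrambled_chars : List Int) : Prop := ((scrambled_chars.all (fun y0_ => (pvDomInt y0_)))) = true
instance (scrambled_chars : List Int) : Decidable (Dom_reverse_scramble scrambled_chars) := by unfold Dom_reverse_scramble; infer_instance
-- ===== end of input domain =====

-- B replaces A's per-character chain of eight switch_bits calls by the single composed
-- bit permutation applied to the low byte in one gather pass (objective: simpler).

-- ===== PORT A =====
-- bit positions are Nat (Python always passes literals with 0 ≤ p1 < p2, so 'p2 - p1' matches Python)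
def switch_bits (c : Int) (p1 p2 : Nat) : Int :=
  let mask1 : Int := 1 <<< p1
  let mask2 : Int := 1 <<< p2
  let bit1 : Int := PySem.Int.band c mask1
  let bit2 : Int := PySem.Int.band c mask2
  let rest : Int := PySem.Int.band c (Int.not (PySem.Int.bor mask1 mask2))
  let shift : Nat := p2 - p1
  PySem.Int.bor (PySem.Int.bor (bit1 <<< shift) (bit2 >>> shift)) rest

def reverse_scramble (scrambled_chars : List Int) : String :=
  let unscrambled : List Char := scrambled_chars.foldl (fun acc c =>
    let c := switch_bits c 6 7
    let c := switch_bits c 2 5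
    let c := switch_bits c 3 4
    let c := switch_bits c 0 1
    let c := switch_bits c 4 7
    let c := switch_bits c 5 6
    let c := switch_bits c 0 3
    let c := switch_bits c 1 2
    acc ++ [Char.ofNat c.toNat]) []       -- chr(c): exact on Pre_ (valid non-surrogate code points)
  String.ofList unscrambled

-- ===== PORT B =====
-- composed effect of A's eight bit-swaps: source bit i -> bit _BIT_DEST[i]
def pvBitDest : List Nat := [2, 3, 6, 7, 0, 1, 4, 5]

def unscramble_byte (b : Int) : Int :=
  (PySem.List.enumerate pvBitDest).foldl
    (fun v sd => PySem.Int.bor v ((PySem.Int.band (b >>> sd.1.toNat) 1) <<< sd.2)) 0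

def reverse_scramble_alt (scrambled_chars : List Int) : String :=
  String.ofList (scrambled_chars.map (fun c =>
    Char.ofNat (PySem.Int.bor (PySem.Int.band c (Int.not 255))
      (unscramble_byte (PySem.Int.band c 255))).toNat))

-- ===== PRECONDITION & SPEC =====
-- Pre_ excludes elements on which chr raises ValueError (negative or ≥ 0x110000) and, although A
-- returns a lone-surrogate string there, the surrogate code points 0xD800–0xDFFF, which Lean's
-- Char/String cannot represent.
def Pre_reverse_scramble (scrambled_chars : List Int) : Prop :=
  ∀ c ∈ scrambled_chars, 0 ≤ c ∧ c < 1114112 ∧ ¬ (55296 ≤ c ∧ c ≤ 57343)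
instance (scrambled_chars : List Int) : Decidable (Pre_reverse_scramble scrambled_chars) := by
  unfold Pre_reverse_scramble; infer_instance

def pvWitness_reverse_scramble : List Int := [65, 200, 10, 1114111]

def Spec_reverse_scramble (scrambled_chars : List Int) (out : String) : Prop := out = reverse_scramble_alt scrambled_chars
instance (scrambled_chars : List Int) (out : String) : Decidable (Spec_reverse_scramble scrambled_chars out) := by unfold Spec_reverse_scramble; infer_instance

-- ===== CLAIM (what is proved, stated in full; the proofs are below) =====
def Claim_equal_reverse_scramble : Prop := ∀ (scrambled_chars : List Int), Dom_reverse_scramble scrambled_chars → Pre_reverse_scramble scrambled_chars → Spec_reverse_scramble scrambled_chars (reverse_scramble scrambled_chars)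

-- ===== LEMMAS AND PROOFS =====

-- Nat-level byte model of one switch_bits step
def sbN (b p1 p2 : Nat) : Nat :=
  ((b &&& (1 <<< p1)) <<< (p2 - p1)) ||| ((b &&& (1 <<< p2)) >>> (p2 - p1)) |||
    (b - (b &&& ((1 <<< p1) ||| (1 <<< p2))))

def byteA (b : Nat) : Nat :=
  sbN (sbN (sbN (sbN (sbN (sbN (sbN (sbN b 6 7) 2 5) 3 4) 0 1) 4 7) 5 6) 0 3) 1 2

theorem and_high (q b m : Nat) (hb : b < 256) (hm : m < 256) :
    (256 * q + b) &&& m = b &&& m := by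
  apply Nat.eq_of_testBit_eq
  intro j
  have h : 256 * q + b = 2 ^ 8 * q + b := by norm_num
  rw [h, Nat.testBit_and, Nat.testBit_and, Nat.testBit_two_pow_mul_add q (by omega : b < 2 ^ 8)]
  by_cases hj : j < 8
  · simp [hj]
  · have : m.testBit j = false := Nat.testBit_lt_two_pow (by calc m < 2^8 := by omega
      _ ≤ 2^j := Nat.pow_le_pow_right (by omega) (by omega))
    simp [hj, this]

theorem or_high (q a r : Nat) (ha : a < 256) (hr : r < 256) :
    a ||| (256 * q + r) = 256 * q + (a ||| r) := by
  apply Nat.eq_of_testBit_eq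
  intro j
  have h : ∀ x, 256 * q + x = 2 ^ 8 * q + x := by intro x; norm_num
  rw [h r, h (a ||| r), Nat.testBit_or,
    Nat.testBit_two_pow_mul_add q (by omega : r < 2 ^ 8),
    Nat.testBit_two_pow_mul_add q (Nat.or_lt_two_pow (x := a) (by omega) (by omega))]
  by_cases hj : j < 8
  · simp [hj, Nat.testBit_or]
  · have : a.testBit j = false := Nat.testBit_lt_two_pow (by calc a < 2^8 := by omega
      _ ≤ 2^j := Nat.pow_le_pow_right (by omega) (by omega))
    simp [hj, this]

theorem band_not (n m : Nat) :
    PySem.Int.band (n : Int) (Int.not (m : Int)) = ((n - (n &&& m) : Nat) : Int) := by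
  have h : (Int.not (m : Int)) = -(m : Int) - 1 := by
    cases m <;> simp [Int.not, Int.negSucc_eq] <;> push_cast <;> ring
  rw [h]
  simp [PySem.Int.band]
  omega

theorem sbN_lt (b p1 p2 : Nat) (hb : b < 256) (hp2 : p2 < 8) (hp : p1 < p2) :
    sbN b p1 p2 < 256 := by
  have hpow : 2 ^ p2 ≤ 128 := by
    calc 2 ^ p2 ≤ 2 ^ 7 := Nat.pow_le_pow_right (by omega) (by omega)
    _ = 128 := by norm_num
  have h1 : (b &&& (1 <<< p1)) <<< (p2 - p1) < 256 := by
    calc (b &&& (1 <<< p1)) <<< (p2 - p1) ≤ (1 <<< p1) <<< (p2 - p1) := by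
          simp [Nat.shiftLeft_eq]
          exact Nat.and_le_right
      _ = 2 ^ p2 := by
          simp [Nat.shiftLeft_eq]
          rw [← pow_add]
          congr 1
          omega
      _ < 256 := by omega
  have h2 : (b &&& (1 <<< p2)) >>> (p2 - p1) < 256 := by
    calc (b &&& (1 <<< p2)) >>> (p2 - p1) ≤ b &&& (1 <<< p2) := Nat.shiftRight_le _ _
      _ ≤ b := Nat.and_le_left
      _ < 256 := hb
  have h3 : b - (b &&& ((1 <<< p1) ||| (1 <<< p2))) < 256 := by omega
  have h256 : (256 : Nat) = 2 ^ 8 := by norm_num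
  unfold sbN
  rw [h256] at h1 h2 h3 ⊢
  exact Nat.or_lt_two_pow (Nat.or_lt_two_pow h1 h2) h3

theorem switch_split (q b p1 p2 : Nat) (hb : b < 256) (hp2 : p2 < 8) (hp : p1 < p2) :
    switch_bits ((256 * q + b : Nat) : Int) p1 p2 = ((256 * q + sbN b p1 p2 : Nat) : Int) := by
  have hp1 : p1 < 8 := by omega
  have hm1 : (1 <<< p1 : Nat) < 256 := by
    simp [Nat.shiftLeft_eq]
    calc 2 ^ p1 ≤ 2 ^ 7 := Nat.pow_le_pow_right (by omega) (by omega)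
      _ < 256 := by norm_num
  have hm2 : (1 <<< p2 : Nat) < 256 := by
    simp [Nat.shiftLeft_eq]
    calc 2 ^ p2 ≤ 2 ^ 7 := Nat.pow_le_pow_right (by omega) (by omega)
      _ < 256 := by norm_num
  have hM : ((1 <<< p1) ||| (1 <<< p2) : Nat) < 256 := by
    have h256 : (256 : Nat) = 2 ^ 8 := by norm_num
    rw [h256] at hm1 hm2 ⊢
    exact Nat.or_lt_two_pow hm1 hm2
  unfold switch_bits
  simp only [← Int.natCast_shiftLeft, ← Int.natCast_shiftRight, Nat.cast_one,
    PySem.Int.band_natCast, PySem.Int.bor_natCast, band_not]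
  rw [and_high q b _ hb hm1, and_high q b _ hb hm2, and_high q b _ hb hM]
  have hrest : 256 * q + b - (b &&& ((1 <<< p1) ||| (1 <<< p2)))
      = 256 * q + (b - (b &&& ((1 <<< p1) ||| (1 <<< p2)))) := by
    have := Nat.and_le_left (n := b) (m := (1 <<< p1) ||| (1 <<< p2))
    omega
  rw [hrest]
  have ha : ((b &&& (1 <<< p1)) <<< (p2 - p1)) ||| ((b &&& (1 <<< p2)) >>> (p2 - p1)) < 256 := by
    have h256 : (256 : Nat) = 2 ^ 8 := by norm_num
    rw [h256]
    apply Nat.or_lt_two_pow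
    · rw [← h256]
      calc (b &&& (1 <<< p1)) <<< (p2 - p1) ≤ (1 <<< p1) <<< (p2 - p1) := by
            simp [Nat.shiftLeft_eq]
            exact Nat.and_le_right
        _ = 2 ^ p2 := by
            simp [Nat.shiftLeft_eq]
            rw [← pow_add]
            congr 1
            omega
        _ < 256 := by
            calc 2 ^ p2 ≤ 2 ^ 7 := Nat.pow_le_pow_right (by omega) (by omega)
              _ < 256 := by norm_num
    · rw [← h256]
      calc (b &&& (1 <<< p2)) >>> (p2 - p1) ≤ b &&& (1 <<< p2) := Nat.shiftRight_le _ _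
        _ ≤ b := Nat.and_le_left
        _ < 256 := hb
  have hr : b - (b &&& ((1 <<< p1) ||| (1 <<< p2))) < 256 := by omega
  rw [or_high q _ _ ha hr]
  rfl

set_option maxRecDepth 100000 in
theorem byte_eq : ∀ b : Fin 256, unscramble_byte ((b : Nat) : Int) = ((byteA b : Nat) : Int) := by
  decide

set_option maxRecDepth 100000 in
theorem byteA_lt : ∀ b : Fin 256, byteA b < 256 := by decide

theorem char_val (c : Int) (h : 0 ≤ c) :
    switch_bits (switch_bits (switch_bits (switch_bits (switch_bits (switch_bits (switch_bits
        (switch_bits c 6 7) 2 5) 3 4) 0 1) 4 7) 5 6) 0 3) 1 2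
      = PySem.Int.bor (PySem.Int.band c (Int.not 255)) (unscramble_byte (PySem.Int.band c 255)) := by
  obtain ⟨n, rfl⟩ : ∃ m : Nat, c = (m : Int) := ⟨c.toNat, (Int.toNat_of_nonneg h).symm⟩
  obtain ⟨q, b, hb, rfl⟩ : ∃ q b, b < 256 ∧ n = 256 * q + b :=
    ⟨n / 256, n % 256, Nat.mod_lt _ (by omega), (Nat.div_add_mod n 256).symm⟩
  have h1 := sbN_lt b 6 7 hb (by omega) (by omega)
  have h2 := sbN_lt _ 2 5 h1 (by omega) (by omega)
  have h3 := sbN_lt _ 3 4 h2 (by omega) (by omega)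
  have h4 := sbN_lt _ 0 1 h3 (by omega) (by omega)
  have h5 := sbN_lt _ 4 7 h4 (by omega) (by omega)
  have h6 := sbN_lt _ 5 6 h5 (by omega) (by omega)
  have h7 := sbN_lt _ 0 3 h6 (by omega) (by omega)
  rw [switch_split q b 6 7 hb (by omega) (by omega),
    switch_split q _ 2 5 h1 (by omega) (by omega),
    switch_split q _ 3 4 h2 (by omega) (by omega),
    switch_split q _ 0 1 h3 (by omega) (by omega),
    switch_split q _ 4 7 h4 (by omega) (by omega),
    switch_split q _ 5 6 h5 (by omega) (by omega),
    switch_split q _ 0 3 h6 (by omega) (by omega),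
    switch_split q _ 1 2 h7 (by omega) (by omega)]
  -- right-hand side
  have e255 : (255 : Int) = ((255 : Nat) : Int) := rfl
  have hmod : (256 * q + b) &&& 255 = b := by
    rw [and_high q b 255 hb (by omega)]
    have : (255 : Nat) = 2 ^ 8 - 1 := by norm_num
    rw [this, Nat.and_two_pow_sub_one_eq_mod]
    omega
  rw [e255, PySem.Int.band_natCast, band_not, hmod]
  have hsub : 256 * q + b - b = 256 * q := by omega
  rw [hsub, byte_eq ⟨b, hb⟩, PySem.Int.bor_natCast]
  have hor : 256 * q ||| byteA b = 256 * q + byteA b := by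
    rw [Nat.lor_comm]
    have := or_high q (byteA b) 0 (byteA_lt ⟨b, hb⟩) (by omega)
    simpa using this
  rw [hor]
  rfl

theorem foldl_append_map {α β : Type} (l : List α) (g : α → β) (acc : List β) :
    l.foldl (fun acc c => acc ++ [g c]) acc = acc ++ l.map g := by
  induction l generalizing acc with
  | nil => simp
  | cons x xs ih => simp [ih]

-- ===== VERDICT (by name: the statement is the Claim_ definition above) =====
theorem reverse_scramble_spec : Claim_equal_reverse_scramble := by
  intro l _ hpre
  unfold Spec_reverse_scramble reverse_scramble reverse_scramble_alt
  rw [foldl_append_map]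
  simp only [List.nil_append]
  congr 1
  apply List.map_congr_left
  intro c hc
  have h0 := (hpre c hc).1
  rw [char_val c h0]
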